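-- pv_equiv track=rewrite | github.com/tabularaza27/ice_cloud_net | src/data/data_preproc.py | get_segment_indices
-- ===== SOURCE A (Python) =====
-- def get_segment_indices(segment_end_idxs):
--     """start/end idxs along time dim"""
--     segment_idxs = [(None, segment_end_idxs[0] + 1)]
--     for idx, i in enumerate(segment_end_idxs):
--         try:
--             segment_idxs.append((i + 2, segment_end_idxs[idx + 1] + 1))
--         except IndexError:
--             segment_idxs.append((i + 2, None))
--     return segment_idxs
-- ===== SOURCE B (Python) =====
-- def get_segment_indices(segment_end_idxs):
--     """start/end idxs along time dim"""
--     bounds = [e + 1 for e in segment_end_idxs]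
--     starts = [None] + [b + 1 for b in bounds]
--     ends = bounds + [None]
--     return list(zip(starts, ends))
-- ===== Notes on version B (the rewrite author's own statement) =====
-- stated objective: idiomatic
-- what changed: Replaces the index-based loop with try/except next-element lookup by precomputing the boundary list once and zipping it against its own shifted copy ([None]+shifted starts vs bounds+[None] ends).
-- outside the precondition, e.g. on get_segment_indices([]): A raises IndexError, B returns [(None, None)]
import Mathlib
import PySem

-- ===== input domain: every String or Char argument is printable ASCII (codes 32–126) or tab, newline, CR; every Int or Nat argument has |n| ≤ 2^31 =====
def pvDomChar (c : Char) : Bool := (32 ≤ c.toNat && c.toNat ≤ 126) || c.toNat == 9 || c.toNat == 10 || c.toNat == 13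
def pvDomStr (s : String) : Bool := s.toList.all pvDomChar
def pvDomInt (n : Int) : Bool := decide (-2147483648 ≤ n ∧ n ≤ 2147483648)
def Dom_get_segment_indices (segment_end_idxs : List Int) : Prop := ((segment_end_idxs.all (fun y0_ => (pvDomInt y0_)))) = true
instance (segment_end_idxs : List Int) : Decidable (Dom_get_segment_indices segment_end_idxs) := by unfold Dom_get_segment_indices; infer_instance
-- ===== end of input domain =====

-- B builds the boundary list once and zips it against its shifted copy instead of
-- A's index loop with try/except next-element lookup (objective: idiomatic).

-- ===== PORT A =====
def get_segment_indices (segment_end_idxs : List Int) : List (Option Int × Option Int) :=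
  match PySem.List.pyGet? segment_end_idxs 0 with
  | none => []  -- segment_end_idxs[0] raises IndexError here; outside Pre_
  | some first =>
    (PySem.List.enumerate segment_end_idxs).foldl
      (fun acc p =>
        match PySem.List.pyGet? segment_end_idxs (p.1 + 1) with
        | some nxt => acc ++ [(some (p.2 + 2), some (nxt + 1))]
        | none => acc ++ [(some (p.2 + 2), none)])
      [(none, some (first + 1))]

-- ===== PORT B =====
def get_segment_indices_alt (segment_end_idxs : List Int) : List (Option Int × Option Int) :=
  let bounds := segment_end_idxs.map (· + 1)
  List.zip (none :: bounds.map (fun b => some (b + 1))) (bounds.map some ++ [none])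

-- ===== PRECONDITION & SPEC =====
-- Pre_ excludes only the empty list, on which A raises IndexError.
def Pre_get_segment_indices (segment_end_idxs : List Int) : Prop := segment_end_idxs ≠ []
instance (segment_end_idxs : List Int) : Decidable (Pre_get_segment_indices segment_end_idxs) := by unfold Pre_get_segment_indices; infer_instance
def pvWitness_get_segment_indices : List Int := [1, 5, 9]

def Spec_get_segment_indices (segment_end_idxs : List Int) (out : List (Option Int × Option Int)) : Prop := out = get_segment_indices_alt segment_end_idxs
instance (segment_end_idxs : List Int) (out : List (Option Int × Option Int)) : Decidable (Spec_get_segment_indices segment_end_idxs out) := by unfold Spec_get_segment_indices; infer_instance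

-- ===== CLAIM (what is proved, stated in full; the proofs are below) =====
def Claim_equal_get_segment_indices : Prop := ∀ (segment_end_idxs : List Int), Dom_get_segment_indices segment_end_idxs → Pre_get_segment_indices segment_end_idxs → Spec_get_segment_indices segment_end_idxs (get_segment_indices segment_end_idxs)

-- ===== LEMMAS AND PROOFS =====

-- common characterisation of the segment list after the first pair
def pvConv : List Int → List (Option Int × Option Int)
  | [] => []
  | [i] => [(some (i + 2), none)]
  | i :: j :: t => (some (i + 2), some (j + 1)) :: pvConv (j :: t)

theorem pvA_loop (L : List Int) :
    ∀ (tail : List Int) (s : ℕ) (acc : List (Option Int × Option Int)),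
      tail = L.drop s →
      (PySem.List.enumerate tail s).foldl
        (fun acc p =>
          match PySem.List.pyGet? L (p.1 + 1) with
          | some nxt => acc ++ [(some (p.2 + 2), some (nxt + 1))]
          | none => acc ++ [(some (p.2 + 2), none)])
        acc = acc ++ pvConv tail := by
  intro tail
  induction tail with
  | nil => intro s acc _; simp [PySem.List.enumerate_nil, pvConv]
  | cons a rest ih =>
    intro s acc h
    have hrest : rest = L.drop (s + 1) := by
      have := congrArg List.tail h
      simpa [List.tail_drop] using this
    have hlook : PySem.List.pyGet? L ((s : Int) + 1) = rest.head? := by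
      have h1 : ((s : Int) + 1) = ((s + 1 : ℕ) : Int) := by push_cast; ring
      rw [h1, PySem.List.pyGet?_natCast]
      have : L[s+1]? = (L.drop (s+1))[0]? := by simp [List.getElem?_drop]
      rw [this, ← hrest]
      cases rest <;> simp
    rw [PySem.List.enumerate_cons, List.foldl_cons]
    cases rest with
    | nil =>
      simp only [hlook, List.head?_nil]
      simp [PySem.List.enumerate_nil, pvConv]
    | cons b t =>
      simp only [hlook, List.head?_cons]
      rw [show ((s : Int) + 1) = ((s + 1 : ℕ) : Int) by push_cast; ring]
      rw [ih (s + 1) _ hrest]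
      simp [pvConv]

theorem pvB_conv (x : Int) (xs : List Int) :
    List.zip (some (x + 1 + 1) :: (xs.map (· + 1)).map (fun b => some (b + 1))) ((xs.map (· + 1)).map some ++ [none]) = pvConv (x :: xs) := by
  induction xs generalizing x with
  | nil =>
    have h2 : (x : Int) + 1 + 1 = x + 2 := by ring
    simp [pvConv, h2]
  | cons y ys ih =>
    simp only [List.map_cons, List.cons_append, List.zip_cons_cons]
    rw [ih y]
    have h2 : (x : Int) + 1 + 1 = x + 2 := by ring
    simp [pvConv, h2]

-- ===== VERDICT (by name: the statement is the Claim_ definition above) =====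
theorem get_segment_indices_spec : Claim_equal_get_segment_indices := by
  unfold Claim_equal_get_segment_indices
  intro xs _ hpre
  unfold Spec_get_segment_indices
  cases xs with
  | nil => exact absurd rfl hpre
  | cons x t =>
    have hA : get_segment_indices (x :: t) = [(none, some (x + 1))] ++ pvConv (x :: t) := by
      rw [get_segment_indices, PySem.List.pyGet?_zero_cons]
      have h := pvA_loop (x :: t) (x :: t) 0 [(none, some (x + 1))] (by simp)
      simpa using h
    have hB : get_segment_indices_alt (x :: t) = (none, some (x + 1)) :: pvConv (x :: t) := by
      rw [get_segment_indices_alt]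
      simp only [List.map_cons, List.cons_append, List.zip_cons_cons]
      rw [pvB_conv x t]
    rw [hA, hB]
    rfl
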